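-- pv_equiv track=rewrite | github.com/pascaldisse/open-sourcefy | src/core/agents/agent18_advanced_build_systems.py | _determine_best_compiler
-- ===== SOURCE A (Python) =====
-- from typing import Dict, Any, List, Optional, Tuple
--
-- def _determine_best_compiler(compilation_attempts: Dict[str, Dict[str, Any]]) -> Optional[str]:
--     """Determine the best compiler based on success and priority"""
--     successful_compilers = []
--
--     for compiler, attempt in compilation_attempts.items():
--         if attempt['success']:
--             successful_compilers.append(compiler)
--
--     if not successful_compilers:
--         return None
--
--     # Priority order: MSVC > MinGW > Clang > GCC
--     priority_order = ['msvc', 'mingw', 'clang', 'gcc']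
--
--     for compiler in priority_order:
--         if compiler in successful_compilers:
--             return compiler
--
--     return successful_compilers[0]  # Fallback to first successful
-- ===== SOURCE B (Python) =====
-- def _determine_best_compiler(compilation_attempts):
--     """Determine the best compiler based on success and priority"""
--     rank = {'msvc': 0, 'mingw': 1, 'clang': 2, 'gcc': 3}
--     successful = [c for c, attempt in compilation_attempts.items() if attempt['success']]
--     if not successful:
--         return None
--     # min is stable: with no priority compiler present every key is 4 and the
--     # first successful compiler (insertion order) is returned.
--     return min(successful, key=lambda c: rank.get(c, 4))
-- ===== Notes on version B (the rewrite author's own statement) =====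
-- stated objective: idiomatic
-- what changed: Replaces the two-phase priority scan (membership test over the successful list for each priority name, then a positional fallback) by one stable min over the successful compilers keyed by a priority-rank dict with default rank 4.
import Mathlib
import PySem

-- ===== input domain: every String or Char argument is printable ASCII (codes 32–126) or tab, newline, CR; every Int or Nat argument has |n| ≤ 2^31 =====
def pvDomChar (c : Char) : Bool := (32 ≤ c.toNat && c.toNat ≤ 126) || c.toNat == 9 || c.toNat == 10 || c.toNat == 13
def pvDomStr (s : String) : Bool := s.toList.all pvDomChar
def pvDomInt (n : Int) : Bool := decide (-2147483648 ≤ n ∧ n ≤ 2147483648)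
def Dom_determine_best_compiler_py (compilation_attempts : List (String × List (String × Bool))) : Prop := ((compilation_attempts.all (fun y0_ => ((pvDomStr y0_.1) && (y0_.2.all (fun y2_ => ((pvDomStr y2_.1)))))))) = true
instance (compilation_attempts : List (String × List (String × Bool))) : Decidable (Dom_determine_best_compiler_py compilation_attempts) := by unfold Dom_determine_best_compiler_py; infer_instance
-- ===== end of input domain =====

-- B replaces A's two-phase priority scan by one stable `min` keyed by a priority-rank dict (idiomatic).

-- ===== PORT A =====
-- attempt['success'] is Dict lookup; under Pre_ the key is present, so getD false is exact.
def determine_best_compiler_py (compilation_attempts : List (String × List (String × Bool))) : Option String :=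
  let successful_compilers : List String :=
    compilation_attempts.foldl
      (fun acc p => if PySem.Dict.getD ⟨p.2⟩ "success" false then acc ++ [p.1] else acc) []
  if successful_compilers.isEmpty then none
  else
    let priority_order : List String := ["msvc", "mingw", "clang", "gcc"]
    match priority_order.find? (fun c => successful_compilers.contains c) with
    | some c => some c
    | none => successful_compilers.head?  -- successful_compilers[0]; the list is nonempty here

-- ===== PORT B =====
def determine_best_compiler_py_alt (compilation_attempts : List (String × List (String × Bool))) : Option String :=
  let rank : PySem.Dict String Int := ⟨[("msvc", 0), ("mingw", 1), ("clang", 2), ("gcc", 3)]⟩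
  let successful : List String :=
    (compilation_attempts.filter (fun p => PySem.Dict.getD ⟨p.2⟩ "success" false)).map Prod.fst
  if successful.isEmpty then none
  else PySem.List.min? successful (fun c => PySem.Dict.getD rank c 4)

-- ===== PRECONDITION & SPEC =====
-- Pre_ excludes exactly the inputs where some attempt dict lacks the 'success' key, on which A raises KeyError.
def Pre_determine_best_compiler_py (compilation_attempts : List (String × List (String × Bool))) : Prop :=
  (compilation_attempts.all (fun p => (PySem.Dict.get? (⟨p.2⟩ : PySem.Dict String Bool) "success").isSome)) = true
instance (compilation_attempts : List (String × List (String × Bool))) : Decidable (Pre_determine_best_compiler_py compilation_attempts) := by unfold Pre_determine_best_compiler_py; infer_instance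

def pvWitness_determine_best_compiler_py : (List (String × List (String × Bool))) :=
  [("msvc", [("success", true)]), ("tcc", [("success", false)])]

def Spec_determine_best_compiler_py (compilation_attempts : List (String × List (String × Bool))) (out : Option String) : Prop := out = determine_best_compiler_py_alt compilation_attempts
instance (compilation_attempts : List (String × List (String × Bool))) (out : Option String) : Decidable (Spec_determine_best_compiler_py compilation_attempts out) := by unfold Spec_determine_best_compiler_py; infer_instance

-- ===== CLAIM (what is proved, stated in full; the proofs are below) =====
def Claim_equal_determine_best_compiler_py : Prop := ∀ (compilation_attempts : List (String × List (String × Bool))), Dom_determine_best_compiler_py compilation_attempts → Pre_determine_best_compiler_py compilation_attempts → Spec_determine_best_compiler_py compilation_attempts (determine_best_compiler_py compilation_attempts)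

-- ===== LEMMAS AND PROOFS =====

-- B's key function, named for the proofs.
def pvKey (c : String) : Int :=
  PySem.Dict.getD (⟨[("msvc", 0), ("mingw", 1), ("clang", 2), ("gcc", 3)]⟩ : PySem.Dict String Int) c 4

theorem pvKey_eq (c : String) :
    pvKey c = if c = "msvc" then 0 else if c = "mingw" then 1 else
              if c = "clang" then 2 else if c = "gcc" then 3 else 4 := by
  by_cases h1 : c = "msvc"
  · subst h1; decide
  · by_cases h2 : c = "mingw"
    · subst h2; decide
    · by_cases h3 : c = "clang"
      · subst h3; decide
      · by_cases h4 : c = "gcc"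
        · subst h4; decide
        · have b1 : ("msvc" == c) = false := by simp [Ne.symm h1]
          have b2 : ("mingw" == c) = false := by simp [Ne.symm h2]
          have b3 : ("clang" == c) = false := by simp [Ne.symm h3]
          have b4 : ("gcc" == c) = false := by simp [Ne.symm h4]
          simp [pvKey, PySem.Dict.getD, PySem.Dict.get?, List.find?,
                b1, b2, b3, b4, h1, h2, h3, h4]

theorem pvKey_nonneg (c : String) : 0 ≤ pvKey c := by
  rw [pvKey_eq]; split_ifs <;> omega

theorem pvMin?_const (xs : List String) (k : Int) (h : ∀ y ∈ xs, pvKey y = k) :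
    PySem.List.min? xs pvKey = xs.head? := by
  cases xs with
  | nil => rfl
  | cons x t =>
    show List.foldl _ (some x) t = some x
    have hx : pvKey x = k := h x (by simp)
    have ht : ∀ y ∈ t, pvKey y = k := fun y hy => h y (by simp [hy])
    clear h
    induction t generalizing x with
    | nil => rfl
    | cons y t ih =>
      have hy : pvKey y = k := ht y (by simp)
      have hlt : ¬ pvKey y < pvKey x := by rw [hx, hy]; omega
      simp only [List.foldl_cons, hlt, ite_false]
      exact ih x hx (fun z hz => ht z (by simp [hz]))

-- Core: A's priority scan equals B's keyed min on a nonempty successful list.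
theorem pvScan_eq_min (succ : List String) (hne : succ ≠ []) :
    (match (["msvc", "mingw", "clang", "gcc"] : List String).find? (fun c => succ.contains c) with
     | some c => some c
     | none => succ.head?) = PySem.List.min? succ pvKey := by
  obtain ⟨m, hm⟩ : ∃ m, PySem.List.min? succ pvKey = some m := by
    cases hmin : PySem.List.min? succ pvKey with
    | none => exact absurd ((PySem.List.min?_eq_none_iff succ pvKey).1 hmin) hne
    | some m => exact ⟨m, rfl⟩
  have hmem : m ∈ succ := PySem.List.min?_mem hm
  have hmin := PySem.List.min?_isMin hm
  rw [hm]
  by_cases h0 : "msvc" ∈ succ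
  · have hk : pvKey m = 0 := by
      have h1 : pvKey m ≤ pvKey "msvc" := hmin _ h0
      have h2 : pvKey "msvc" = 0 := by decide
      have h3 := pvKey_nonneg m
      omega
    have hme : m = "msvc" := by
      rw [pvKey_eq] at hk; split_ifs at hk with e1 <;> first | exact e1 | omega
    simp [List.find?, h0, hme]
  · have hc : m ≠ "msvc" := fun e => h0 (e ▸ hmem)
    by_cases h1 : "mingw" ∈ succ
    · have hk : pvKey m = 1 := by
        have ha : pvKey m ≤ pvKey "mingw" := hmin _ h1
        have hb : pvKey "mingw" = 1 := by decide
        have hg : 1 ≤ pvKey m := by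
          rw [pvKey_eq]; split_ifs with e1 <;> first | exact absurd e1 hc | omega
        omega
      have hme : m = "mingw" := by
        rw [pvKey_eq] at hk
        split_ifs at hk with e1 e2 <;> first | exact absurd e1 hc | exact e2 | omega
      simp [List.find?, h0, h1, hme]
    · have hd : m ≠ "mingw" := fun e => h1 (e ▸ hmem)
      by_cases h2 : "clang" ∈ succ
      · have hk : pvKey m = 2 := by
          have ha : pvKey m ≤ pvKey "clang" := hmin _ h2
          have hb : pvKey "clang" = 2 := by decide
          have hg : 2 ≤ pvKey m := by
            rw [pvKey_eq]
            split_ifs with e1 e2 <;>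
              first | exact absurd e1 hc | exact absurd e2 hd | omega
          omega
        have hme : m = "clang" := by
          rw [pvKey_eq] at hk
          split_ifs at hk with e1 e2 e3h <;>
            first | exact absurd e1 hc | exact absurd e2 hd | exact e3h | omega
        simp [List.find?, h0, h1, h2, hme]
      · have he : m ≠ "clang" := fun e => h2 (e ▸ hmem)
        by_cases h3 : "gcc" ∈ succ
        · have hk : pvKey m = 3 := by
            have ha : pvKey m ≤ pvKey "gcc" := hmin _ h3
            have hb : pvKey "gcc" = 3 := by decide
            have hg : 3 ≤ pvKey m := by
              rw [pvKey_eq]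
              split_ifs with e1 e2 <;>
                first | exact absurd e1 hc | exact absurd e2 hd | omega
            omega
          have hme : m = "gcc" := by
            rw [pvKey_eq] at hk
            split_ifs at hk with e1 e2 e3 e4h <;>
              first | exact absurd e1 hc | exact absurd e2 hd | exact absurd e3 he | exact e4h | omega
          simp [List.find?, h0, h1, h2, h3, hme]
        · have hall : ∀ y ∈ succ, pvKey y = 4 := by
            intro y hy
            have c0 : y ≠ "msvc" := fun e => h0 (e ▸ hy)
            have c1 : y ≠ "mingw" := fun e => h1 (e ▸ hy)
            have c2 : y ≠ "clang" := fun e => h2 (e ▸ hy)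
            have c3 : y ≠ "gcc" := fun e => h3 (e ▸ hy)
            rw [pvKey_eq]; simp [c0, c1, c2, c3]
          rw [← hm, pvMin?_const succ 4 hall]
          simp [List.find?, h0, h1, h2, h3]

-- ===== VERDICT (by name: the statement is the Claim_ definition above) =====
theorem determine_best_compiler_py_spec : Claim_equal_determine_best_compiler_py := by
  intro cas _hdom _hpre
  unfold Spec_determine_best_compiler_py determine_best_compiler_py determine_best_compiler_py_alt
  simp only [PySem.List.foldl_append_if
    (fun p : String × List (String × Bool) => PySem.Dict.getD ⟨p.2⟩ "success" false)
    Prod.fst cas [], List.nil_append]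
  set succ := (cas.filter (fun p => PySem.Dict.getD ⟨p.2⟩ "success" false)).map Prod.fst with hsucc
  by_cases he : succ.isEmpty
  · simp [he]
  · simp only [he, if_neg, Bool.false_eq_true, not_false_iff]
    have h := pvScan_eq_min succ (by simpa [List.isEmpty_iff] using he)
    simpa only [pvKey] using h
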